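-- pv_equiv track=rewrite | github.com/mbaljko/vault-grading-pipeline | 01_units/pipelines/pl1C_rubric_devt/python/generate-scoring-report_non_Layer0_consuming.py | calculate_item_stability_metrics
-- ===== SOURCE A (Python) =====
-- def format_ratio(numerator: int, denominator: int) -> str:
-- 	if denominator <= 0:
-- 		return "0.000"
-- 	return f"{(numerator / denominator):.3f}"
--
-- def calculate_item_stability_metrics(item_histories: dict[object, list[str]]) -> dict[str, int | str]:
-- 	total_items = len(item_histories)
-- 	if total_items == 0:
-- 		return {
-- 			"flip_rate": "0.000",
-- 			"consensus_rate": "0.000",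
-- 			"max_item_disagreement": "0",
-- 			"ici": "0.000",
-- 		}
-- 	comparison_count = max(len(next(iter(item_histories.values()))) - 1, 0)
-- 	disagreements_by_pair = [0] * comparison_count
-- 	consensus_items = 0
-- 	ever_flip_items = 0
-- 	for item_history in item_histories.values():
-- 		if len(set(item_history)) == 1:
-- 			consensus_items += 1
-- 		has_flip = False
-- 		for pair_index in range(comparison_count):
-- 			if item_history[pair_index] == item_history[pair_index + 1]:
-- 				continue
-- 			disagreements_by_pair[pair_index] += 1
-- 			has_flip = True
-- 		if has_flip:
-- 			ever_flip_items += 1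
-- 	total_comparisons = total_items * comparison_count
-- 	return {
-- 		"flip_rate": format_ratio(sum(disagreements_by_pair), total_comparisons),
-- 		"consensus_rate": format_ratio(consensus_items, total_items),
-- 		"max_item_disagreement": str(max(disagreements_by_pair) if disagreements_by_pair else 0),
-- 		"ici": format_ratio(ever_flip_items, total_items),
-- 	}
-- ===== SOURCE B (Python) =====
-- def format_ratio(numerator: int, denominator: int) -> str:
-- 	if denominator <= 0:
-- 		return "0.000"
-- 	return f"{(numerator / denominator):.3f}"
--
-- def calculate_item_stability_metrics(item_histories):
-- 	total_items = len(item_histories)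
-- 	if total_items == 0:
-- 		return {
-- 			"flip_rate": "0.000",
-- 			"consensus_rate": "0.000",
-- 			"max_item_disagreement": "0",
-- 			"ici": "0.000",
-- 		}
-- 	histories = list(item_histories.values())
-- 	comparison_count = max(len(histories[0]) - 1, 0)
-- 	consensus_items = sum(1 for h in histories if len(set(h)) == 1)
-- 	disagreements_by_pair = [
-- 		sum(1 for h in histories if h[i] != h[i + 1])
-- 		for i in range(comparison_count)
-- 	]
-- 	ever_flip_items = sum(
-- 		1 for h in histories
-- 		if any(h[i] != h[i + 1] for i in range(comparison_count))
-- 	)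
-- 	total_comparisons = total_items * comparison_count
-- 	return {
-- 		"flip_rate": format_ratio(sum(disagreements_by_pair), total_comparisons),
-- 		"consensus_rate": format_ratio(consensus_items, total_items),
-- 		"max_item_disagreement": str(max(disagreements_by_pair, default=0)),
-- 		"ici": format_ratio(ever_flip_items, total_items),
-- 	}
-- ===== Notes on version B (the rewrite author's own statement) =====
-- stated objective: simpler
-- what changed: A's single fused per-item loop with three mutable accumulators (a mutated disagreement array, consensus counter, ever-flip flag/counter) is split into three independent one-liner aggregations: a count of unanimous histories, a column-major per-pair disagreement list built by comprehension, and an any-based ever-flip count.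
import Mathlib
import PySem

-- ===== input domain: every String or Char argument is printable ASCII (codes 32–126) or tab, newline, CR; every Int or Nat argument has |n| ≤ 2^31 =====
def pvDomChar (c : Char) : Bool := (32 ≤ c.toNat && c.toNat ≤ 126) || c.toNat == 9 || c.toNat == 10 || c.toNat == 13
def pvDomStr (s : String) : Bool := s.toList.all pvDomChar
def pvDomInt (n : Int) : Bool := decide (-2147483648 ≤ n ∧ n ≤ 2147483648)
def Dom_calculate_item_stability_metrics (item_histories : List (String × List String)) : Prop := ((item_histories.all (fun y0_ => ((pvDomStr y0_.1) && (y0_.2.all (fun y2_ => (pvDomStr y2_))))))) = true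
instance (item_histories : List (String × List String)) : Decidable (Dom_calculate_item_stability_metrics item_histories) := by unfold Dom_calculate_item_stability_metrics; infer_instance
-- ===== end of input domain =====

-- B splits A's fused per-item loop into three independent aggregations (a countP for consensus,
-- column-major counting for the per-pair disagreement list, an any-based count for ever-flip);
-- objective: simpler. Equivalence is about the RETURN value (A mutates nothing).

-- ===== PORT A =====
-- Shared helper (A's and B's Python both use the same-module helper format_ratio):
-- hand-written exact port of f"{(numerator/denominator):.3f}" for
-- 0 ≤ numerator ≤ denominator·2^52 and 0 < denominator (every call below satisfies this):
-- first the IEEE-754 double nearest to n/d (round half to even, 53-bit significand), then that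
-- dyadic rational rounded to 3 decimals half-to-even — exactly CPython's float division
-- followed by '.3f' formatting on this range.
def pvFindShift (n d : Nat) : Nat → Nat → Nat
  | s, 0 => s
  | s, fuel+1 => if d * 2 ^ 52 ≤ n * 2 ^ s then s else pvFindShift n d (s + 1) fuel

def pvRoundHalfEven (a b : Nat) : Nat :=
  let q := a / b
  let r := a % b
  if b < 2 * r ∨ (2 * r = b ∧ q % 2 = 1) then q + 1 else q

def pvPad3 (m : Nat) : List Char :=
  let cs := PySem.Int.toChars (m : Int)
  List.replicate (3 - cs.length) '0' ++ cs

def pvFormat3 (numerator denominator : Int) : String :=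
  let n := numerator.toNat
  let d := denominator.toNat
  if n = 0 then "0.000"
  else
    let s := pvFindShift n d 0 (d + 53)
    let m := pvRoundHalfEven (n * 2 ^ s) d          -- significand of the double nearest n/d
    let q := pvRoundHalfEven (m * 1000) (2 ^ s)     -- '.3f' on the exact value m/2^s
    String.ofList (PySem.Int.toChars ((q / 1000 : Nat) : Int) ++ '.' :: pvPad3 (q % 1000))

def format_ratio (numerator denominator : Int) : String :=
  if denominator ≤ 0 then "0.000" else pvFormat3 numerator denominator

-- item_history[pair_index] != item_history[pair_index + 1] (shared comparison; pyGetD is exact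
-- under Pre_, which puts every accessed index in range)
def pvDiffAt (item_history : List String) (pair_index : Nat) : Bool :=
  !(PySem.List.pyGetD item_history (pair_index : Int) "" ==
    PySem.List.pyGetD item_history ((pair_index : Int) + 1) "")

-- A's inner loop body: 'if equal: continue; disagreements_by_pair[pair_index] += 1; has_flip = True'
def pvInnerStep (item_history : List String) (p : List Int × Bool) (pair_index : Nat) : List Int × Bool :=
  if PySem.List.pyGetD item_history (pair_index : Int) "" ==
     PySem.List.pyGetD item_history ((pair_index : Int) + 1) "" then p
  else (PySem.List.pySetD p.1 (pair_index : Int)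
          (PySem.List.pyGetD p.1 (pair_index : Int) 0 + 1), true)

-- A's outer loop body over (disagreements_by_pair, consensus_items, ever_flip_items)
def pvItemStep (comparison_count : Nat) (st : List Int × Int × Int) (item_history : List String) :
    List Int × Int × Int :=
  let cons := if PySem.Set.len (PySem.Set.ofList item_history) == 1 then st.2.1 + 1 else st.2.1
  let q := (List.range comparison_count).foldl (pvInnerStep item_history) (st.1, false)
  (q.1, cons, if q.2 then st.2.2 + 1 else st.2.2)

def calculate_item_stability_metrics (item_histories : List (String × List String)) : List (String × String) :=
  let total_items : Int := item_histories.length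
  if total_items = 0 then
    [("flip_rate", "0.000"), ("consensus_rate", "0.000"),
     ("max_item_disagreement", "0"), ("ici", "0.000")]
  else
    let values := item_histories.map (·.2)
    -- max(len(next(iter(...))) - 1, 0) : Nat subtraction is exactly this max
    let comparison_count : Nat := (values.headD []).length - 1
    let st := values.foldl (pvItemStep comparison_count)
      (List.replicate comparison_count (0 : Int), (0 : Int), (0 : Int))
    let total_comparisons : Int := total_items * comparison_count
    [("flip_rate", format_ratio st.1.sum total_comparisons),
     ("consensus_rate", format_ratio st.2.1 total_items),
     ("max_item_disagreement",
        PySem.Int.toStr (if st.1.isEmpty then 0 else (PySem.List.max? st.1 (fun x => x)).getD 0)),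
     ("ici", format_ratio st.2.2 total_items)]

-- ===== PORT B =====
def calculate_item_stability_metrics_alt (item_histories : List (String × List String)) : List (String × String) :=
  let total_items : Int := item_histories.length
  if total_items = 0 then
    [("flip_rate", "0.000"), ("consensus_rate", "0.000"),
     ("max_item_disagreement", "0"), ("ici", "0.000")]
  else
    let histories := item_histories.map (·.2)
    let comparison_count : Nat := (histories.headD []).length - 1
    let consensus_items : Int :=
      (histories.countP (fun h => PySem.Set.len (PySem.Set.ofList h) == 1) : Nat)
    let disagreements_by_pair : List Int := (List.range comparison_count).map (fun i =>
      ((histories.countP (fun h => pvDiffAt h i) : Nat) : Int))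
    let ever_flip_items : Int :=
      (histories.countP (fun h => (List.range comparison_count).any (fun i => pvDiffAt h i)) : Nat)
    let total_comparisons : Int := total_items * comparison_count
    [("flip_rate", format_ratio disagreements_by_pair.sum total_comparisons),
     ("consensus_rate", format_ratio consensus_items total_items),
     ("max_item_disagreement",
        PySem.Int.toStr ((PySem.List.max? disagreements_by_pair (fun x => x)).getD 0)),
     ("ici", format_ratio ever_flip_items total_items)]

-- ===== PRECONDITION & SPEC =====
-- Pre_ excludes exactly the inputs on which A raises IndexError: when at least one comparison is
-- made (first history has length ≥ 2), every history must be longer than comparison_count.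
def Pre_calculate_item_stability_metrics (item_histories : List (String × List String)) : Prop :=
  ∀ p ∈ item_histories,
    (item_histories.headD ("", [])).2.length - 1 = 0 ∨
    (item_histories.headD ("", [])).2.length - 1 < p.2.length

instance (item_histories : List (String × List String)) : Decidable (Pre_calculate_item_stability_metrics item_histories) := by unfold Pre_calculate_item_stability_metrics; infer_instance

def pvWitness_calculate_item_stability_metrics : (List (String × List String)) :=
  [("a", ["x", "y"]), ("b", ["x", "x"])]

def Spec_calculate_item_stability_metrics (item_histories : List (String × List String)) (out : List (String × String)) : Prop := out = calculate_item_stability_metrics_alt item_histories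
instance (item_histories : List (String × List String)) (out : List (String × String)) : Decidable (Spec_calculate_item_stability_metrics item_histories out) := by unfold Spec_calculate_item_stability_metrics; infer_instance

-- ===== CLAIM (what is proved, stated in full; the proofs are below) =====
def Claim_equal_calculate_item_stability_metrics : Prop := ∀ (item_histories : List (String × List String)), Dom_calculate_item_stability_metrics item_histories → Pre_calculate_item_stability_metrics item_histories → Spec_calculate_item_stability_metrics item_histories (calculate_item_stability_metrics item_histories)

-- ===== LEMMAS AND PROOFS =====

theorem pvInner_len (h : List String) (m : Nat) (dis : List Int) (b : Bool) :
    ((List.range m).foldl (pvInnerStep h) (dis, b)).1.length = dis.length := by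
  induction m generalizing b with
  | zero => rfl
  | succ m ih =>
    rw [List.range_succ, List.foldl_append, List.foldl_cons, List.foldl_nil]
    unfold pvInnerStep
    split
    · exact ih b
    · simp only [PySem.List.length_pySetD]
      exact ih b

theorem pvInner_get (h : List String) (m : Nat) (dis : List Int) (b : Bool) (j : Nat)
    (hm : m ≤ dis.length) :
    ((List.range m).foldl (pvInnerStep h) (dis, b)).1.getD j 0 =
      dis.getD j 0 + if j < m ∧ pvDiffAt h j then 1 else 0 := by
  induction m generalizing b with
  | zero => simp
  | succ m ih =>
    rw [List.range_succ, List.foldl_append, List.foldl_cons, List.foldl_nil]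
    have hlen := pvInner_len h m dis b
    set q := (List.range m).foldl (pvInnerStep h) (dis, b) with hq
    unfold pvInnerStep
    have hP : pvDiffAt h m = !(PySem.List.pyGetD h (m : Int) "" ==
        PySem.List.pyGetD h ((m : Int) + 1) "") := rfl
    rw [hq] at hlen ⊢
    clear hq
    split
    · rename_i heq
      rw [ih b (by omega)]
      have : pvDiffAt h m = false := by rw [hP, heq]; rfl
      by_cases hjm : j = m
      · subst hjm; simp [this]
      · congr 1
        by_cases hlt : j < m
        · have h1 : (j < m + 1) := by omega
          simp [hlt, h1]
        · have h1 : ¬ (j < m + 1) := by omega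
          simp [hlt, h1]
    · rename_i hne
      have hmlen : m < (List.foldl (pvInnerStep h) (dis, b) (List.range m)).1.length := by
        rw [pvInner_len]; omega
      have hPm : pvDiffAt h m = true := by
        rw [hP]
        simp only [Bool.not_eq_true']
        exact Bool.eq_false_iff.mpr hne
      simp only [PySem.List.pySetD_natCast, PySem.List.pyGetD_natCast]
      by_cases hjm : j = m
      · subst hjm
        rw [List.getD_eq_getElem _ _ (by simpa using hmlen), List.getElem_set_self,
          List.getD_eq_getElem _ _ hmlen, ← List.getD_eq_getElem _ 0, ih b (by omega)]
        simp [hPm]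
      · rw [List.getD_eq_getElem?_getD, List.getElem?_set_ne (by omega),
          ← List.getD_eq_getElem?_getD, ih b (by omega)]
        by_cases hlt : j < m
        · have h1 : (j < m + 1) := by omega
          simp [hlt, h1]
        · have h1 : ¬ (j < m + 1) := by omega
          simp [hlt, h1]

theorem pvInner_snd (h : List String) (m : Nat) (dis : List Int) (b : Bool) :
    ((List.range m).foldl (pvInnerStep h) (dis, b)).2 = (b || (List.range m).any (pvDiffAt h)) := by
  have hstep : ∀ (q : List Int × Bool) (k : Nat), (pvInnerStep h q k).2 = (q.2 || pvDiffAt h k) := by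
    intro q k
    unfold pvInnerStep
    split <;> rename_i hc
    · have hd : pvDiffAt h k = false := by unfold pvDiffAt; rw [hc]; rfl
      rw [hd, Bool.or_false]
    · have hd : pvDiffAt h k = true := by
        unfold pvDiffAt
        rw [Bool.eq_false_iff.mpr hc]
        rfl
      rw [hd, Bool.or_true]
  induction m generalizing b with
  | zero => simp
  | succ m ih =>
    rw [List.range_succ, List.foldl_append, List.foldl_cons, List.foldl_nil, List.any_append,
      hstep, ih b]
    simp [Bool.or_assoc]

theorem pvItemStep_def (cc : Nat) (st : List Int × Int × Int) (h : List String) :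
    pvItemStep cc st h =
      (((List.range cc).foldl (pvInnerStep h) (st.1, false)).1,
       (if PySem.Set.len (PySem.Set.ofList h) == 1 then st.2.1 + 1 else st.2.1),
       (if ((List.range cc).foldl (pvInnerStep h) (st.1, false)).2 then st.2.2 + 1 else st.2.2)) :=
  rfl

theorem pvOuter_len (cc : Nat) (hs : List (List String)) (dis : List Int) (c f : Int) :
    (hs.foldl (pvItemStep cc) (dis, c, f)).1.length = dis.length := by
  induction hs generalizing dis c f with
  | nil => rfl
  | cons hd tl ih =>
    rw [List.foldl_cons, pvItemStep_def, ih]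
    exact pvInner_len hd cc dis false

theorem pvOuter_get (cc : Nat) (hs : List (List String)) (dis : List Int) (c f : Int) (j : Nat)
    (hcc : cc ≤ dis.length) (hj : j < cc) :
    (hs.foldl (pvItemStep cc) (dis, c, f)).1.getD j 0 =
      dis.getD j 0 + (hs.countP (fun h => pvDiffAt h j) : Int) := by
  induction hs generalizing dis c f with
  | nil => simp
  | cons hd tl ih =>
    rw [List.foldl_cons, pvItemStep_def,
      ih _ _ _ (by rw [pvInner_len]; omega),
      pvInner_get hd cc dis false j (by omega), List.countP_cons]
    cases hpd : pvDiffAt hd j <;> simp [hpd, hj] <;> ring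

theorem pvOuter_cons (cc : Nat) (hs : List (List String)) (dis : List Int) (c f : Int) :
    (hs.foldl (pvItemStep cc) (dis, c, f)).2.1 =
      c + (hs.countP (fun h => PySem.Set.len (PySem.Set.ofList h) == 1) : Int) := by
  induction hs generalizing dis c f with
  | nil => simp
  | cons hd tl ih =>
    rw [List.foldl_cons, pvItemStep_def, ih, List.countP_cons]
    cases hc : (PySem.Set.len (PySem.Set.ofList hd) == 1) <;> simp [hc] <;> ring

theorem pvOuter_flip (cc : Nat) (hs : List (List String)) (dis : List Int) (c f : Int) :
    (hs.foldl (pvItemStep cc) (dis, c, f)).2.2 =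
      f + (hs.countP (fun h => (List.range cc).any (fun i => pvDiffAt h i)) : Int) := by
  induction hs generalizing dis c f with
  | nil => simp
  | cons hd tl ih =>
    rw [List.foldl_cons, pvItemStep_def, ih, List.countP_cons,
      pvInner_snd hd cc dis false]
    simp only [Bool.false_or]
    cases hc : (List.range cc).any (fun i => pvDiffAt hd i) <;>
      simp [hc] <;> ring

theorem pvDis_eq (cc : Nat) (hs : List (List String)) :
    (hs.foldl (pvItemStep cc) (List.replicate cc (0 : Int), (0 : Int), (0 : Int))).1 =
      (List.range cc).map (fun i => ((hs.countP (fun h => pvDiffAt h i) : Nat) : Int)) := by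
  apply List.ext_getElem
  · rw [pvOuter_len]; simp
  · intro j h1 h2
    have hj : j < cc := by
      have h1' := h1
      rw [pvOuter_len, List.length_replicate] at h1'
      exact h1'
    rw [← List.getD_eq_getElem _ 0 h1,
      pvOuter_get cc hs _ 0 0 j (by simp) hj]
    simp [hj]

theorem pvMax_guard (L : List Int) :
    (if L.isEmpty then (0 : Int) else (PySem.List.max? L (fun x => x)).getD 0) =
      (PySem.List.max? L (fun x => x)).getD 0 := by
  cases L with
  | nil => simp [PySem.List.max?]
  | cons x t => rfl

-- ===== VERDICT (by name: the statement is the Claim_ definition above) =====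
theorem calculate_item_stability_metrics_spec : Claim_equal_calculate_item_stability_metrics := by
  intro d _ _
  unfold Spec_calculate_item_stability_metrics
  cases d with
  | nil => rfl
  | cons p tl =>
    unfold calculate_item_stability_metrics calculate_item_stability_metrics_alt
    rw [if_neg (by push_cast [List.length_cons]; omega),
      if_neg (by push_cast [List.length_cons]; omega)]
    simp only [pvDis_eq, pvOuter_cons, pvOuter_flip, pvMax_guard, zero_add]
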